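-- pv_equiv track=rewrite | github.com/ceastld/alg | leetcode/hot200/dp/h377.ans.py | combinationSum4_recursive
-- ===== SOURCE A (Python) =====
-- from typing import List
--
-- def combinationSum4_recursive(nums: List[int], target: int) -> int:
--     """
--     递归解法（带记忆化）
--
--     解题思路：
--     1. 递归计算每个金额的组合数
--     2. 使用记忆化避免重复计算
--
--     时间复杂度：O(target * len(nums))
--     空间复杂度：O(target)
--     """
--     if target == 0:
--         return 1
--
--     if not nums:
--         return 0
--
--     memo = {}
--
--     def dfs(remaining):
--         if remaining in memo:
--             return memo[remaining]
--
--         if remaining == 0: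
--             return 1
--
--         if remaining < 0:
--             return 0
--
--         result = 0
--         for num in nums:
--             if remaining >= num:
--                 result += dfs(remaining - num)
--
--         memo[remaining] = result
--         return result
--
--     return dfs(target)
-- ===== SOURCE B (Python) =====
-- from typing import List
--
-- def combinationSum4_recursive(nums: List[int], target: int) -> int:
--     if target < 0:
--         return 0
--     dp = [1]
--     for r in range(1, target + 1):
--         dp.append(sum(dp[r - num] for num in nums if num <= r))
--     return dp[target]
-- ===== Notes on version B (the rewrite author's own statement) =====
-- stated objective: simpler
-- what changed: Replaced the memoized top-down recursion over a dict with a short iterative bottom-up DP table filled from 0 to target (no recursion, no memo dict).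
import Mathlib
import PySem

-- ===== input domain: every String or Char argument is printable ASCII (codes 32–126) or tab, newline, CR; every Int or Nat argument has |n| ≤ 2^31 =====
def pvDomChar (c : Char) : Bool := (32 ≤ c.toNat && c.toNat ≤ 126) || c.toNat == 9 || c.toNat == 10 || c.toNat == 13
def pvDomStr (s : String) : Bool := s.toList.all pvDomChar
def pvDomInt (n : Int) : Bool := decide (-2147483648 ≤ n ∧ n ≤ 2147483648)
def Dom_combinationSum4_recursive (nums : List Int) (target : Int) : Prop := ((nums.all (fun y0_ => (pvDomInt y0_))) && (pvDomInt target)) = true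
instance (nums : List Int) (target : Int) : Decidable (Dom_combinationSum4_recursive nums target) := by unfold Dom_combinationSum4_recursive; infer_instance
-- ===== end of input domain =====

-- B replaces A's memoized top-down recursion with an iterative bottom-up DP table (return value only; neither side observably mutates its arguments).

-- ===== PORT A =====
-- Literal port of A's inner `dfs` with an explicit memo dict.  Python's call stack is modelled by
-- a fuel argument; fuel target.toNat+1 always suffices under Pre_ (every recursive call decreases
-- `remaining` by a positive amount), so the fuel-exhausted branch is unreachable there.
def pvDfsA (nums : List Int) : Nat → Int → PySem.Dict Int Int → Int × PySem.Dict Int Int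
  | 0, _, memo => (0, memo)   -- fuel exhausted: unreachable under Pre_
  | fuel + 1, remaining, memo =>
    match memo.get? remaining with
    | some v => (v, memo)
    | none =>
      if remaining = 0 then (1, memo)
      else if remaining < 0 then (0, memo)
      else
        let p := nums.foldl (fun (acc : Int × PySem.Dict Int Int) num =>
          if num ≤ remaining then
            let q := pvDfsA nums fuel (remaining - num) acc.2
            (acc.1 + q.1, q.2)
          else acc) (0, memo)
        (p.1, p.2.insert remaining p.1)

def combinationSum4_recursive (nums : List Int) (target : Int) : Int :=
  if target = 0 then 1
  else if nums = [] then 0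
  else (pvDfsA nums (target.toNat + 1) target PySem.Dict.empty).1

-- ===== PORT B =====
-- Loop body of Source B: dp.append(sum(dp[r - num] for num in nums if num <= r)).
-- pyGetD's default is never consulted on inputs admitted by Pre_ (there 0 ≤ r - num < len dp).
def pvBStep (nums : List Int) (dp : List Int) (r : Int) : List Int :=
  dp ++ [((nums.filter (fun num => decide (num ≤ r))).map
            (fun num => PySem.List.pyGetD dp (r - num) 0)).sum]

def combinationSum4_recursive_alt (nums : List Int) (target : Int) : Int :=
  if target < 0 then 0
  else
    let dp := (PySem.List.pyRange 1 (target + 1) 1).foldl (pvBStep nums) [1]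
    PySem.List.pyGetD dp target 0

-- ===== PRECONDITION & SPEC =====
-- Pre_ excludes exactly the inputs where A raises RecursionError: a positive target together
-- with a non-positive element of nums makes A's dfs recurse forever.  (For target ≤ 0 the
-- recursion stops immediately, so those inputs stay admitted whatever nums contains.)
def Pre_combinationSum4_recursive (nums : List Int) (target : Int) : Prop :=
  target ≤ 0 ∨ ∀ n ∈ nums, 0 < n
instance (nums : List Int) (target : Int) : Decidable (Pre_combinationSum4_recursive nums target) := by unfold Pre_combinationSum4_recursive; infer_instance

def pvWitness_combinationSum4_recursive : List Int × Int := ([1, 2, 3], 4)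

def Spec_combinationSum4_recursive (nums : List Int) (target : Int) (out : Int) : Prop := out = combinationSum4_recursive_alt nums target
instance (nums : List Int) (target : Int) (out : Int) : Decidable (Spec_combinationSum4_recursive nums target out) := by unfold Spec_combinationSum4_recursive; infer_instance

-- ===== CLAIM (what is proved, stated in full; the proofs are below) =====
def Claim_equal_combinationSum4_recursive : Prop := ∀ (nums : List Int) (target : Int), Dom_combinationSum4_recursive nums target → Pre_combinationSum4_recursive nums target → Spec_combinationSum4_recursive nums target (combinationSum4_recursive nums target)

-- ===== LEMMAS AND PROOFS =====

-- The mathematical DP table both programs compute: pvTab n = [count 0, …, count n].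
def pvTab (nums : List Int) : Nat → List Int
  | 0 => [1]
  | n + 1 => pvBStep nums (pvTab nums n) ((n : Int) + 1)

def pvG (nums : List Int) (n : Nat) : Int := PySem.List.pyGetD (pvTab nums n) (n : Int) 0

def pvF (nums : List Int) (r : Int) : Int := if r < 0 then 0 else pvG nums r.toNat

theorem pvTab_length (nums : List Int) (n : Nat) : (pvTab nums n).length = n + 1 := by
  induction n with
  | zero => rfl
  | succ n ih => simp [pvTab, pvBStep, ih]

theorem pvGetD_append_len (l : List Int) (x : Int) (k : Nat) (hk : k = l.length) :
    (l ++ [x]).getD k 0 = x := by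
  subst hk; rw [List.getD_append_right] <;> simp

theorem pvTab_get (nums : List Int) (m k : Nat) (hk : k ≤ m) :
    PySem.List.pyGetD (pvTab nums m) (k : Int) 0 = pvG nums k := by
  induction m with
  | zero => have : k = 0 := by omega
            subst this; rfl
  | succ m ih =>
    rcases Nat.lt_or_ge k (m + 1) with h | h
    · rw [← ih (by omega)]
      simp only [pvTab, pvBStep, PySem.List.pyGetD_natCast]
      exact List.getD_append _ _ 0 k (by rw [pvTab_length]; omega)
    · have hkm : k = m + 1 := by omega
      subst hkm; rfl

theorem pvG_succ (nums : List Int) (hpos : ∀ n ∈ nums, 0 < n) (n : Nat) :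
    pvG nums (n + 1) =
      ((nums.filter (fun num => decide (num ≤ ((n : Int) + 1)))).map
        (fun num => pvF nums (((n : Int) + 1) - num))).sum := by
  unfold pvG
  conv_lhs => rw [pvTab]
  unfold pvBStep
  have hlen := pvTab_length nums n
  rw [show (((n + 1 : Nat)) : Int) = ((n : Int) + 1) from by push_cast; ring] at *
  rw [show ((n : Int) + 1) = (((n + 1 : Nat)) : Int) from by push_cast; ring]
  rw [PySem.List.pyGetD_natCast, pvGetD_append_len _ _ _ (by omega)]
  rw [show (((n + 1 : Nat)) : Int) = ((n : Int) + 1) from by push_cast; ring]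
  apply congrArg List.sum
  apply List.map_congr_left
  intro num hnum
  obtain ⟨hmem, hle'⟩ := List.mem_filter.mp hnum
  have h1 : 0 < num := hpos num hmem
  have h2 : num ≤ (n : Int) + 1 := of_decide_eq_true hle'
  rw [show ((n : Int) + 1) - num = ((((n : Int) + 1 - num).toNat : Nat) : Int) from by omega]
  rw [pvTab_get nums n _ (by omega)]
  unfold pvF
  rw [if_neg (by omega)]
  simp
  congr 1
  omega

-- B's foldl over range(1, k+1) builds exactly pvTab.
theorem pvB_foldl (nums : List Int) (k : Nat) :
    (PySem.List.pyRange 1 ((k : Int) + 1) 1).foldl (pvBStep nums) [1] = pvTab nums k := by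
  induction k with
  | zero =>
    rw [PySem.List.pyRange_one_eq_nil (show ((0 : Nat) : Int) + 1 ≤ 1 by omega)]
    rfl
  | succ k ih =>
    rw [show (((k + 1 : Nat)) : Int) + 1 = ((k : Int) + 1) + 1 from by push_cast; ring]
    rw [PySem.List.pyRange_one_succ_right (by omega), List.foldl_append]
    simp only [List.foldl_cons, List.foldl_nil, ih]
    rfl

theorem pvB_eq_F (nums : List Int) (target : Int) :
    combinationSum4_recursive_alt nums target = pvF nums target := by
  unfold combinationSum4_recursive_alt pvF
  split_ifs with h
  · rfl
  · rw [show target = ((target.toNat : Nat) : Int) from by omega, pvB_foldl nums target.toNat]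
    exact pvTab_get nums target.toNat target.toNat (le_refl _)

-- Memo invariant for A's dfs: every stored value is the true count.
def pvInv (nums : List Int) (memo : PySem.Dict Int Int) : Prop :=
  ∀ k v, memo.get? k = some v → v = pvF nums k

theorem pvF_zero (nums : List Int) : pvF nums 0 = 1 := rfl

theorem pvF_neg (nums : List Int) (r : Int) (h : r < 0) : pvF nums r = 0 := by
  unfold pvF; rw [if_pos h]

theorem pvF_pos (nums : List Int) (hpos : ∀ n ∈ nums, 0 < n) (r : Int) (hr : 0 < r) :
    pvF nums r = ((nums.filter (fun num => decide (num ≤ r))).map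
      (fun num => pvF nums (r - num))).sum := by
  have h1 : pvF nums r = pvG nums ((r.toNat - 1) + 1) := by
    unfold pvF; rw [if_neg (by omega)]; congr 1; omega
  rw [h1, pvG_succ nums hpos (r.toNat - 1),
      show (((r.toNat - 1 : Nat)) : Int) + 1 = r from by omega]

theorem pvDfsA_correct (nums : List Int) (hpos : ∀ n ∈ nums, 0 < n) :
    ∀ (fuel : Nat) (remaining : Int) (memo : PySem.Dict Int Int),
      pvInv nums memo → remaining < (fuel : Int) →
      (pvDfsA nums fuel remaining memo).1 = pvF nums remaining
        ∧ pvInv nums (pvDfsA nums fuel remaining memo).2 := by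
  intro fuel
  induction fuel with
  | zero =>
    intro remaining memo hinv hlt
    exact ⟨(pvF_neg nums remaining (by exact_mod_cast hlt)).symm, hinv⟩
  | succ fuel ih =>
    intro remaining memo hinv hlt
    simp only [pvDfsA]
    cases hmget : memo.get? remaining with
    | some v => exact ⟨hinv remaining v hmget, hinv⟩
    | none =>
      by_cases h0 : remaining = 0
      · subst h0; rw [if_pos rfl]; exact ⟨rfl, hinv⟩
      · rw [if_neg h0]
        by_cases hneg : remaining < 0
        · rw [if_pos hneg]; exact ⟨(pvF_neg nums remaining hneg).symm, hinv⟩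
        · rw [if_neg hneg]
          have hrpos : 0 < remaining := by omega
          -- loop invariant over any all-positive sublist l
          have loop : ∀ (l : List Int), (∀ x ∈ l, 0 < x) → ∀ (s : Int) (m : PySem.Dict Int Int),
              pvInv nums m →
              (l.foldl (fun (acc : Int × PySem.Dict Int Int) num =>
                if num ≤ remaining then
                  let q := pvDfsA nums fuel (remaining - num) acc.2
                  (acc.1 + q.1, q.2)
                else acc) (s, m)).1
                = s + ((l.filter (fun num => decide (num ≤ remaining))).map
                    (fun num => pvF nums (remaining - num))).sum
              ∧ pvInv nums ((l.foldl (fun (acc : Int × PySem.Dict Int Int) num =>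
                if num ≤ remaining then
                  let q := pvDfsA nums fuel (remaining - num) acc.2
                  (acc.1 + q.1, q.2)
                else acc) (s, m)).2) := by
            intro l
            induction l with
            | nil => intro _ s m hm; exact ⟨by simp, hm⟩
            | cons x xs ihl =>
              intro hxl s m hm
              have hx : 0 < x := hxl x (List.mem_cons_self ..)
              simp only [List.foldl_cons]
              by_cases hle : x ≤ remaining
              · have hlt' : remaining - x < (fuel : Int) := by push_cast at hlt; omega
                obtain ⟨hval, hinv'⟩ := ih (remaining - x) m hm hlt'
                rw [if_pos hle]
                obtain ⟨e1, e2⟩ := ihl (fun y hy => hxl y (List.mem_cons_of_mem _ hy))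
                  (s + (pvDfsA nums fuel (remaining - x) m).1)
                  (pvDfsA nums fuel (remaining - x) m).2 hinv'
                refine ⟨?_, e2⟩
                rw [e1, hval]
                simp only [List.filter_cons, decide_eq_true_eq, if_pos hle, List.map_cons,
                  List.sum_cons]
                ring
              · rw [if_neg hle]
                obtain ⟨e1, e2⟩ := ihl (fun y hy => hxl y (List.mem_cons_of_mem _ hy)) s m hm
                refine ⟨e1.trans ?_, e2⟩
                simp [hle]
          obtain ⟨hsum, hinv'⟩ := loop nums hpos 0 memo hinv
          constructor
          · show (nums.foldl (fun (acc : Int × PySem.Dict Int Int) num =>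
                if num ≤ remaining then
                  let q := pvDfsA nums fuel (remaining - num) acc.2
                  (acc.1 + q.1, q.2)
                else acc) (0, memo)).1 = pvF nums remaining
            rw [hsum, pvF_pos nums hpos remaining hrpos]; ring
          · show pvInv nums ((nums.foldl (fun (acc : Int × PySem.Dict Int Int) num =>
                if num ≤ remaining then
                  let q := pvDfsA nums fuel (remaining - num) acc.2
                  (acc.1 + q.1, q.2)
                else acc) (0, memo)).2.insert remaining
                  ((nums.foldl (fun (acc : Int × PySem.Dict Int Int) num =>
                if num ≤ remaining then
                  let q := pvDfsA nums fuel (remaining - num) acc.2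
                  (acc.1 + q.1, q.2)
                else acc) (0, memo)).1))
            intro k v hkv
            rcases eq_or_ne k remaining with hk | hk
            · subst hk
              rw [PySem.Dict.get?_insert_self] at hkv
              have hv := Option.some.inj hkv
              rw [← hv, hsum, pvF_pos nums hpos k hrpos]; ring
            · rw [PySem.Dict.get?_insert_of_ne _ _ hk] at hkv
              exact hinv' k v hkv

-- ===== VERDICT (by name: the statement is the Claim_ definition above) =====
theorem combinationSum4_recursive_spec : Claim_equal_combinationSum4_recursive := by
  intro nums target _ hpre
  unfold Spec_combinationSum4_recursive
  rw [pvB_eq_F]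
  unfold combinationSum4_recursive
  split_ifs with h0 hnil
  · subst h0; exact (pvF_zero nums).symm
  · subst hnil
    rcases lt_or_gt_of_ne h0 with h | h
    · exact (pvF_neg [] target h).symm
    · rw [pvF_pos [] (by simp) target h]; simp
  · rcases hpre with h | hpos
    · have hneg : target < 0 := lt_of_le_of_ne h h0
      rw [pvF_neg nums target hneg]
      rw [show target.toNat + 1 = 0 + 1 from by omega]
      simp only [pvDfsA, PySem.Dict.get?_empty]
      rw [if_neg h0, if_pos hneg]
    · have hlt : target < ((target.toNat + 1 : Nat) : Int) := by push_cast; omega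
      have hinv : pvInv nums PySem.Dict.empty := by
        intro k v hkv; rw [PySem.Dict.get?_empty] at hkv; exact absurd hkv (by simp)
      exact (pvDfsA_correct nums hpos (target.toNat + 1) target PySem.Dict.empty hinv hlt).1
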